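-- pv_equiv track=rewrite | github.com/eliburnsbaseball/statpad-forever | scripts/build_nba_headshots.py | choose_player
-- ===== SOURCE A (Python) =====
-- def choose_player(candidates, start, end):
--     exact = [p for p in candidates if int(p.get("FROM_YEAR") or 0) == start and int(p.get("TO_YEAR") or 0) == end]
--     if exact:
--         return exact[0]
--
--     overlapping = []
--     for player in candidates:
--         p_start = int(player.get("FROM_YEAR") or 0)
--         p_end = int(player.get("TO_YEAR") or 0)
--         overlap = min(p_end, end) - max(p_start, start)
--         if overlap >= 0:
--             distance = abs(p_start - start) + abs(p_end - end)
--             overlapping.append((distance, -overlap, player))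
--     if overlapping:
--         overlapping.sort(key=lambda item: (item[0], item[1]))
--         return overlapping[0][2]
--
--     nearest = []
--     for player in candidates:
--         p_start = int(player.get("FROM_YEAR") or 0)
--         p_end = int(player.get("TO_YEAR") or 0)
--         distance = abs(p_start - start) + abs(p_end - end)
--         nearest.append((distance, player))
--     nearest.sort(key=lambda item: item[0])
--     return nearest[0][1] if nearest else None
-- ===== SOURCE B (Python) =====
-- def choose_player(candidates, start, end):
--     def priority(p):
--         p_start = int(p.get("FROM_YEAR") or 0)
--         p_end = int(p.get("TO_YEAR") or 0)
--         overlap = min(p_end, end) - max(p_start, start)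
--         distance = abs(p_start - start) + abs(p_end - end)
--         if p_start == start and p_end == end:
--             tier, third = 0, 0
--         elif overlap >= 0:
--             tier, third = 1, -overlap
--         else:
--             tier, third = 2, 0
--         return (tier, distance, third)
--     return min(candidates, key=priority) if candidates else None
-- ===== Notes on version B (the rewrite author's own statement) =====
-- stated objective: simpler
-- what changed: A's three phases (exact filter, sort of overlapping triples by (distance,-overlap), sort of all by distance) are replaced by one composite lexicographic priority (tier, distance, tie-break) per player and a single stable min pass with no sorting.
import Mathlib
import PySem

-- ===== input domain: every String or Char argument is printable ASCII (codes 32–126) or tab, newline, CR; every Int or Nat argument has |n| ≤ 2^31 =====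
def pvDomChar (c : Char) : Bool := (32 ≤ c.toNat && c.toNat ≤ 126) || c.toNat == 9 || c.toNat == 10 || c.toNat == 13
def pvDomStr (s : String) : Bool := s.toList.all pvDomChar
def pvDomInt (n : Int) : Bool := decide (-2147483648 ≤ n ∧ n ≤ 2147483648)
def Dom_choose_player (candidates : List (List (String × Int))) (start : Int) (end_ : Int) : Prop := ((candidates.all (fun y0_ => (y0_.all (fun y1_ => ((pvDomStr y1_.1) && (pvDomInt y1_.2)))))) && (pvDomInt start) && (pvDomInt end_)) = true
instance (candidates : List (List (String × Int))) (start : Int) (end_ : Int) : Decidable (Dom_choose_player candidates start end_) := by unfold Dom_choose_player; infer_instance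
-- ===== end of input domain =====

-- B replaces A's three filter/sort phases by one composite priority tuple per player and a single stable `min` pass; same value, no sorting.

-- ===== PORT A =====
-- literal port of A: exact filter, then overlapping triples sorted by (distance, -overlap), then nearest by distance
def choose_player (candidates : List (List (String × Int))) (start : Int) (end_ : Int) : Option (List (String × Int)) :=
  let exact := candidates.filter (fun p =>
    decide ((PySem.Dict.mk p).getD "FROM_YEAR" 0 = start) && decide ((PySem.Dict.mk p).getD "TO_YEAR" 0 = end_))
  match exact with
  | p :: _ => some p
  | [] =>
    let overlapping := candidates.foldl (fun acc player =>
        let p_start := (PySem.Dict.mk player).getD "FROM_YEAR" 0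
        let p_end := (PySem.Dict.mk player).getD "TO_YEAR" 0
        let overlap := min p_end end_ - max p_start start
        if 0 ≤ overlap then
          acc ++ [(|p_start - start| + |p_end - end_|, -overlap, player)]
        else acc) []
    -- Python sorts by the 2-tuple (item[0], item[1]): PySem.List.sorted2
    match PySem.List.sorted2 overlapping (fun item => item.1) (fun item => item.2.1) false with
    | item :: _ => some item.2.2
    | [] =>
      let nearest := candidates.foldl (fun acc player =>
          let p_start := (PySem.Dict.mk player).getD "FROM_YEAR" 0
          let p_end := (PySem.Dict.mk player).getD "TO_YEAR" 0
          acc ++ [(|p_start - start| + |p_end - end_|, player)]) []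
      match PySem.List.sorted nearest (fun item => item.1) false with
      | item :: _ => some item.2
      | [] => none

-- ===== PORT B =====
-- Source B's key function `priority`: a Python 3-tuple (tier, distance, third)
def pvPriority (start end_ : Int) (p : List (String × Int)) : Int × Int × Int :=
  let p_start := (PySem.Dict.mk p).getD "FROM_YEAR" 0
  let p_end := (PySem.Dict.mk p).getD "TO_YEAR" 0
  let overlap := min p_end end_ - max p_start start
  let distance := |p_start - start| + |p_end - end_|
  let tt : Int × Int :=
    if p_start = start ∧ p_end = end_ then (0, 0)
    else if 0 ≤ overlap then (1, -overlap)
    else (2, 0)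
  (tt.1, distance, tt.2)

-- Python's `<` on two 3-tuples of ints (lexicographic), as PySem renders tuple keys
def pvTupleLt (a b : Int × Int × Int) : Bool :=
  decide (a.1 < b.1) ||
    (decide (a.1 = b.1) &&
      (decide (a.2.1 < b.2.1) || (decide (a.2.1 = b.2.1) && decide (a.2.2 < b.2.2))))

-- `min(xs, key=key)` for a 3-tuple key: first element with minimal key (Python's min)
def pvMinByKey {α : Type} (key : α → Int × Int × Int) (xs : List α) : Option α :=
  xs.foldl (fun acc x =>
    match acc with
    | none => some x
    | some m => if pvTupleLt (key x) (key m) then some x else some m) none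

def choose_player_alt (candidates : List (List (String × Int))) (start : Int) (end_ : Int) : Option (List (String × Int)) :=
  match candidates with
  | [] => none
  | _ => pvMinByKey (pvPriority start end_) candidates

-- ===== PRECONDITION & SPEC =====
def Spec_choose_player (candidates : List (List (String × Int))) (start : Int) (end_ : Int) (out : Option (List (String × Int))) : Prop := out = choose_player_alt candidates start end_
instance (candidates : List (List (String × Int))) (start : Int) (end_ : Int) (out : Option (List (String × Int))) : Decidable (Spec_choose_player candidates start end_ out) := by unfold Spec_choose_player; infer_instance

-- ===== CLAIM (what is proved, stated in full; the proofs are below) =====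
def Claim_equal_choose_player : Prop := ∀ (candidates : List (List (String × Int))) (start : Int) (end_ : Int), Dom_choose_player candidates start end_ → Spec_choose_player candidates start end_ (choose_player candidates start end_)

-- ===== LEMMAS AND PROOFS =====

-- proof-side names for the pieces both ports compute
def pvFy (p : List (String × Int)) : Int := (PySem.Dict.mk p).getD "FROM_YEAR" 0
def pvTy (p : List (String × Int)) : Int := (PySem.Dict.mk p).getD "TO_YEAR" 0
def pvOv (s e : Int) (p : List (String × Int)) : Int := min (pvTy p) e - max (pvFy p) s
def pvDist (s e : Int) (p : List (String × Int)) : Int := |pvFy p - s| + |pvTy p - e|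
def pvExact (s e : Int) (p : List (String × Int)) : Bool := decide (pvFy p = s) && decide (pvTy p = e)
def pvOvB (s e : Int) (p : List (String × Int)) : Bool := decide (0 ≤ pvOv s e p)

-- the step of Python's first-minimum fold, for an arbitrary boolean comparison
def pvStepB {α : Type} (lt : α → α → Bool) (acc : Option α) (x : α) : Option α :=
  match acc with
  | none => some x
  | some m => if lt x m then some x else some m

theorem pv_foldB_mem {α : Type} (lt : α → α → Bool) :
    ∀ (xs : List α) (acc : Option α) (m : α), xs.foldl (pvStepB lt) acc = some m →
      acc = some m ∨ m ∈ xs := by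
  intro xs
  induction xs with
  | nil => intro acc m h; left; simpa using h
  | cons x t ih =>
    intro acc m h
    rcases ih (pvStepB lt acc x) m h with h' | h'
    · cases acc with
      | none =>
        right
        simp only [pvStepB] at h'
        exact List.mem_cons.mpr (Or.inl (Option.some.inj h').symm)
      | some m0 =>
        simp only [pvStepB] at h'
        split_ifs at h' with hcmp
        · right; exact List.mem_cons.mpr (Or.inl (Option.some.inj h').symm)
        · left; exact h'.symm ▸ rfl
    · right; exact List.mem_cons.mpr (Or.inr h')

theorem pv_foldB_const {α : Type} (lt : α → α → Bool) (m : α) :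
    ∀ (xs : List α), (∀ y ∈ xs, lt y m = false) → xs.foldl (pvStepB lt) (some m) = some m := by
  intro xs
  induction xs with
  | nil => intro _; rfl
  | cons x t ih =>
    intro h
    have hx : lt x m = false := h x (by simp)
    simpa [List.foldl_cons, pvStepB, hx] using ih (fun y hy => h y (by simp [hy]))

theorem pv_foldB_isSome {α : Type} (lt : α → α → Bool) :
    ∀ (xs : List α) (a : α), ∃ m, xs.foldl (pvStepB lt) (some a) = some m := by
  intro xs
  induction xs with
  | nil => intro a; exact ⟨a, rfl⟩
  | cons x t ih =>
    intro a
    simp only [List.foldl_cons, pvStepB]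
    split_ifs
    · exact ih x
    · exact ih a

theorem pv_minB_of_decomp {α : Type} (lt : α → α → Bool) (pre suf : List α) (m : α)
    (hpre : ∀ y ∈ pre, lt m y = true) (hsuf : ∀ y ∈ suf, lt y m = false) :
    (pre ++ m :: suf).foldl (pvStepB lt) none = some m := by
  rw [List.foldl_append]
  cases h : pre.foldl (pvStepB lt) none with
  | none =>
    simp only [List.foldl_cons, pvStepB]
    exact pv_foldB_const lt m suf hsuf
  | some m' =>
    have hm' : m' ∈ pre := by
      rcases pv_foldB_mem lt pre none m' h with h' | h'
      · exact absurd h' (by simp)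
      · exact h'
    have hlt : lt m m' = true := hpre m' hm'
    simp only [List.foldl_cons, pvStepB, hlt, if_pos]
    exact pv_foldB_const lt m suf hsuf

theorem pv_foldB_some_inv {α : Type} (lt : α → α → Bool)
    (P1 : ∀ a b c, lt a b = true → lt b c = true → lt a c = true)
    (P2 : ∀ a b c, lt a b = true → lt c b = false → lt a c = true) :
    ∀ (xs : List α) (a m : α), xs.foldl (pvStepB lt) (some a) = some m →
      (m = a ∧ ∀ y ∈ xs, lt y a = false) ∨
      (∃ pre suf, xs = pre ++ m :: suf ∧ lt m a = true ∧
        (∀ y ∈ pre, lt m y = true) ∧ (∀ y ∈ suf, lt y m = false)) := by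
  intro xs
  induction xs with
  | nil =>
    intro a m h
    left
    exact ⟨(Option.some.inj (by simpa using h)).symm, by simp⟩
  | cons x t ih =>
    intro a m h
    cases hx : lt x a with
    | true =>
      simp only [List.foldl_cons, pvStepB, hx, if_pos] at h
      rcases ih x m h with ⟨rfl, hall⟩ | ⟨pre, suf, rfl, hlt, hpre, hsuf⟩
      · right; exact ⟨[], t, rfl, hx, by simp, hall⟩
      · right
        refine ⟨x :: pre, suf, rfl, P1 m x a hlt hx, ?_, hsuf⟩
        intro y hy
        rcases List.mem_cons.mp hy with rfl | hy
        · exact hlt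
        · exact hpre y hy
    | false =>
      simp only [List.foldl_cons, pvStepB, hx] at h
      rcases ih a m h with ⟨rfl, hall⟩ | ⟨pre, suf, rfl, hlt, hpre, hsuf⟩
      · left
        refine ⟨rfl, ?_⟩
        intro y hy
        rcases List.mem_cons.mp hy with rfl | hy
        · exact hx
        · exact hall y hy
      · right
        refine ⟨x :: pre, suf, rfl, hlt, ?_, hsuf⟩
        intro y hy
        rcases List.mem_cons.mp hy with rfl | hy
        · exact P2 m a y hlt hx
        · exact hpre y hy

theorem pv_minB_decomp {α : Type} (lt : α → α → Bool)
    (P1 : ∀ a b c, lt a b = true → lt b c = true → lt a c = true)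
    (P2 : ∀ a b c, lt a b = true → lt c b = false → lt a c = true)
    (xs : List α) (m : α) (h : xs.foldl (pvStepB lt) none = some m) :
    ∃ pre suf, xs = pre ++ m :: suf ∧ (∀ y ∈ pre, lt m y = true) ∧ (∀ y ∈ suf, lt y m = false) := by
  cases xs with
  | nil => simp at h
  | cons x t =>
    simp only [List.foldl_cons, pvStepB] at h
    rcases pv_foldB_some_inv lt P1 P2 t x m h with ⟨rfl, hall⟩ | ⟨pre, suf, rfl, hlt, hpre, hsuf⟩
    · exact ⟨[], t, rfl, by simp, hall⟩
    · refine ⟨x :: pre, suf, rfl, ?_, hsuf⟩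
      intro y hy
      rcases List.mem_cons.mp hy with rfl | hy
      · exact hlt
      · exact hpre y hy

theorem pv_insertBy_head? {α : Type} (before : α → α → Bool) (x : α) (ys : List α) :
    (PySem.List.insertBy before x ys).head? = pvStepB before ys.head? x := by
  cases ys with
  | nil => rfl
  | cons y t =>
    cases h : before x y with
    | true => simp [PySem.List.insertBy, h, pvStepB]
    | false => simp [PySem.List.insertBy, h, pvStepB]

theorem pv_sortFold_head? {α : Type} (before : α → α → Bool) :
    ∀ (l acc : List α),
      (l.foldl (fun acc x => PySem.List.insertBy before x acc) acc).head?
        = l.foldl (pvStepB before) acc.head? := by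
  intro l
  induction l with
  | nil => intro acc; rfl
  | cons x t ih =>
    intro acc
    rw [List.foldl_cons, List.foldl_cons, ih, pv_insertBy_head?]

theorem pv_foldB_map {α β : Type} (f : α → β) (lt : β → β → Bool) :
    ∀ (xs : List α) (acc : Option α),
      (xs.map f).foldl (pvStepB lt) (acc.map f)
        = (xs.foldl (pvStepB (fun x y => lt (f x) (f y))) acc).map f := by
  intro xs
  induction xs with
  | nil => intro acc; rfl
  | cons x t ih =>
    intro acc
    rw [List.map_cons, List.foldl_cons, List.foldl_cons, ← ih]
    congr 1
    cases acc with
    | none => rfl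
    | some m => simp only [Option.map_some, pvStepB]; split_ifs <;> rfl

theorem pv_foldl_filtmap {α β : Type} (pred : α → Prop) [inst : DecidablePred pred] (f : α → β) :
    ∀ (xs : List α) (acc : List β),
      xs.foldl (fun acc x => if pred x then acc ++ [f x] else acc) acc
        = acc ++ (xs.filter (fun x => decide (pred x))).map f := by
  intro xs
  induction xs with
  | nil => intro acc; simp
  | cons x t ih =>
    intro acc
    by_cases h : pred x
    · simp [List.foldl_cons, h, ih]
    · simp [List.foldl_cons, h, ih]

theorem pv_foldl_map {α β : Type} (f : α → β) :
    ∀ (xs : List α) (acc : List β), xs.foldl (fun acc x => acc ++ [f x]) acc = acc ++ xs.map f := by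
  intro xs
  induction xs with
  | nil => intro acc; simp
  | cons x t ih => intro acc; simp [List.foldl_cons, ih]

-- unfolding the ports into the named pieces
theorem pv_A_unfold (candidates : List (List (String × Int))) (s e : Int) :
    choose_player candidates s e =
      (match candidates.filter (pvExact s e) with
       | p :: _ => some p
       | [] =>
         match PySem.List.sorted2
             (candidates.foldl (fun acc q =>
               if 0 ≤ pvOv s e q then acc ++ [(pvDist s e q, -(pvOv s e q), q)] else acc) [])
             (fun item => item.1) (fun item => item.2.1) false with
         | item :: _ => some item.2.2
         | [] =>
           match PySem.List.sorted
               (candidates.foldl (fun acc q => acc ++ [(pvDist s e q, q)]) [])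
               (fun item => item.1) false with
           | item :: _ => some item.2
           | [] => none) := rfl

theorem pv_B_ne (candidates : List (List (String × Int))) (s e : Int) (h : candidates ≠ []) :
    choose_player_alt candidates s e = pvMinByKey (pvPriority s e) candidates := by
  cases candidates with
  | nil => exact absurd rfl h
  | cons c t => rfl

theorem pv_B_foldB (key : List (String × Int) → Int × Int × Int) (xs : List (List (String × Int))) :
    pvMinByKey key xs = xs.foldl (pvStepB (fun x y => pvTupleLt (key x) (key y))) none := rfl

-- the two boolean comparisons A's sorts use
def pvLt2 (a b : Int × Int × List (String × Int)) : Bool :=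
  decide (a.1 < b.1) || (!decide (b.1 < a.1) && decide (a.2.1 < b.2.1))
def pvLtN (a b : Int × List (String × Int)) : Bool := decide (a.1 < b.1)

theorem pv_sorted2_eq_foldl (xs : List (Int × Int × List (String × Int))) :
    PySem.List.sorted2 xs (fun item => item.1) (fun item => item.2.1) false
      = xs.foldl (fun acc x => PySem.List.insertBy pvLt2 x acc) [] := rfl

theorem pv_sortedN_eq_foldl (xs : List (Int × List (String × Int))) :
    PySem.List.sorted xs (fun item => item.1) false
      = xs.foldl (fun acc x => PySem.List.insertBy pvLtN x acc) [] := rfl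

-- shape of the priority key in the three tiers
theorem pv_pr_exact (s e : Int) (p : List (String × Int)) (h : pvExact s e p = true) :
    pvPriority s e p = (0, 0, 0) := by
  have h1 : pvFy p = s := by simpa [pvExact] using (Bool.and_eq_true_iff.mp h).1
  have h2 : pvTy p = e := by simpa [pvExact] using (Bool.and_eq_true_iff.mp h).2
  simp [pvFy] at h1
  simp [pvTy] at h2
  simp [pvPriority, h1, h2]

theorem pv_pr_ov (s e : Int) (p : List (String × Int)) (hne : pvExact s e p = false)
    (hov : pvOvB s e p = true) :
    pvPriority s e p = (1, pvDist s e p, -(pvOv s e p)) := by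
  have hne' : ¬ (pvFy p = s ∧ pvTy p = e) := by
    intro ⟨a, b⟩; simp [pvExact, a, b] at hne
  have hov' : 0 ≤ pvOv s e p := by simpa [pvOvB] using hov
  simp only [pvPriority]
  rw [if_neg (by simpa [pvFy, pvTy] using hne'), if_pos (by simpa [pvOv, pvFy, pvTy] using hov')]
  rfl

theorem pv_pr_far (s e : Int) (p : List (String × Int)) (hne : pvExact s e p = false)
    (hov : pvOvB s e p = false) :
    pvPriority s e p = (2, pvDist s e p, 0) := by
  have hne' : ¬ (pvFy p = s ∧ pvTy p = e) := by
    intro ⟨a, b⟩; simp [pvExact, a, b] at hne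
  have hov' : ¬ 0 ≤ pvOv s e p := by simpa [pvOvB] using hov
  simp only [pvPriority]
  rw [if_neg (by simpa [pvFy, pvTy] using hne'), if_neg (by simpa [pvOv, pvFy, pvTy] using hov')]
  rfl

-- the priority of any player never beats (0,0,0); a non-exact player's is strictly after it
theorem pv_bot_le (s e : Int) (q : List (String × Int)) :
    pvTupleLt (pvPriority s e q) (0, 0, 0) = false := by
  cases hex : pvExact s e q with
  | true => rw [pv_pr_exact s e q hex]; rfl
  | false =>
    cases hov : pvOvB s e q with
    | true => rw [pv_pr_ov s e q hex hov]; simp [pvTupleLt]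
    | false => rw [pv_pr_far s e q hex hov]; simp [pvTupleLt]

theorem pv_bot_lt (s e : Int) (q : List (String × Int)) (h : pvExact s e q = false) :
    pvTupleLt (0, 0, 0) (pvPriority s e q) = true := by
  cases hov : pvOvB s e q with
  | true => rw [pv_pr_ov s e q h hov]; simp [pvTupleLt]
  | false => rw [pv_pr_far s e q h hov]; simp [pvTupleLt]

theorem pv_ov_lt_far (s e : Int) (p q : List (String × Int))
    (hp1 : pvExact s e p = false) (hp2 : pvOvB s e p = true)
    (hq1 : pvExact s e q = false) (hq2 : pvOvB s e q = false) :
    pvTupleLt (pvPriority s e p) (pvPriority s e q) = true := by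
  rw [pv_pr_ov s e p hp1 hp2, pv_pr_far s e q hq1 hq2]
  simp [pvTupleLt]

-- transfer between A's pair comparison on overlap triples and B's priority comparison (tier 1)
theorem pv_ov_lt_transfer (s e : Int) (p q : List (String × Int))
    (hp1 : pvExact s e p = false) (hp2 : pvOvB s e p = true)
    (hq1 : pvExact s e q = false) (hq2 : pvOvB s e q = true) :
    pvTupleLt (pvPriority s e p) (pvPriority s e q)
      = pvLt2 (pvDist s e p, -(pvOv s e p), p) (pvDist s e q, -(pvOv s e q), q) := by
  rw [pv_pr_ov s e p hp1 hp2, pv_pr_ov s e q hq1 hq2]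
  rw [Bool.eq_iff_iff]
  simp only [pvTupleLt, pvLt2, Bool.or_eq_true, Bool.and_eq_true, Bool.not_eq_true',
    decide_eq_true_eq, decide_eq_false_iff_not, lt_self_iff_false, false_or, true_and]
  omega

-- transfer between A's distance comparison and B's priority comparison (tier 2)
theorem pv_far_lt_transfer (s e : Int) (p q : List (String × Int))
    (hp1 : pvExact s e p = false) (hp2 : pvOvB s e p = false)
    (hq1 : pvExact s e q = false) (hq2 : pvOvB s e q = false) :
    pvTupleLt (pvPriority s e p) (pvPriority s e q)
      = pvLtN (pvDist s e p, p) (pvDist s e q, q) := by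
  rw [pv_pr_far s e p hp1 hp2, pv_pr_far s e q hq1 hq2]
  rw [Bool.eq_iff_iff]
  simp only [pvTupleLt, pvLtN, Bool.or_eq_true, Bool.and_eq_true,
    decide_eq_true_eq, lt_self_iff_false, false_or, true_and, and_false, or_false]

-- the comparison properties the generic fold lemmas need
theorem pv_lt2_P1 : ∀ a b c, pvLt2 a b = true → pvLt2 b c = true → pvLt2 a c = true := by
  intro a b c h1 h2
  simp only [pvLt2, Bool.or_eq_true, Bool.and_eq_true, Bool.not_eq_true', decide_eq_true_eq,
    decide_eq_false_iff_not] at h1 h2 ⊢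
  omega

theorem pv_lt2_P2 : ∀ a b c, pvLt2 a b = true → pvLt2 c b = false → pvLt2 a c = true := by
  intro a b c h1 h2
  simp only [pvLt2, Bool.or_eq_true, Bool.and_eq_true, Bool.not_eq_true', decide_eq_true_eq,
    decide_eq_false_iff_not, Bool.or_eq_false_iff, Bool.and_eq_false_iff,
    Bool.not_eq_false'] at h1 h2 ⊢
  omega

theorem pv_ltN_P1 : ∀ a b c, pvLtN a b = true → pvLtN b c = true → pvLtN a c = true := by
  intro a b c
  simp only [pvLtN, decide_eq_true_eq]
  omega

theorem pv_ltN_P2 : ∀ a b c, pvLtN a b = true → pvLtN c b = false → pvLtN a c = true := by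
  intro a b c
  simp only [pvLtN, decide_eq_true_eq, decide_eq_false_iff_not]
  omega

theorem pv_main (candidates : List (List (String × Int))) (s e : Int) :
    choose_player candidates s e = choose_player_alt candidates s e := by
  rw [pv_A_unfold]
  cases hfe : candidates.filter (pvExact s e) with
  | cons p0 rest =>
    -- an exact match exists: A returns the first one; it also has the minimal priority
    obtain ⟨l1, l2, hc, hl1, hp0, -⟩ := List.filter_eq_cons_iff.mp hfe
    have hne : candidates ≠ [] := by rw [hc]; simp
    rw [pv_B_ne candidates s e hne, hc, pv_B_foldB]
    rw [pv_minB_of_decomp _ l1 l2 p0 ?hpre ?hsuf]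
    case hpre =>
      intro y hy
      rw [pv_pr_exact s e p0 hp0]
      exact pv_bot_lt s e y (Bool.eq_false_iff.mpr (hl1 y hy))
    case hsuf =>
      intro y hy
      rw [pv_pr_exact s e p0 hp0]
      exact pv_bot_le s e y
  | nil =>
    have hnoex : ∀ y ∈ candidates, pvExact s e y = false := by
      intro y hy
      exact Bool.eq_false_iff.mpr (List.filter_eq_nil_iff.mp hfe y hy)
    have hov_fold := pv_foldl_filtmap (fun q => 0 ≤ pvOv s e q)
      (fun q => (pvDist s e q, -(pvOv s e q), q)) candidates []
    simp only [List.nil_append] at hov_fold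
    rw [hov_fold]
    rw [show (candidates.filter (fun x => decide (0 ≤ pvOv s e x))) = candidates.filter (pvOvB s e) from rfl]
    cases hsort : PySem.List.sorted2 ((candidates.filter (pvOvB s e)).map (fun q => (pvDist s e q, -(pvOv s e q), q))) (fun item => item.1) (fun item => item.2.1) false with
    | cons it irest =>
      -- some overlapping player exists; A returns the head of the sorted triples
      have hmin : ((candidates.filter (pvOvB s e)).map (fun q => (pvDist s e q, -(pvOv s e q), q))).foldl (pvStepB pvLt2) none = some it := by
        have := pv_sortFold_head? pvLt2 ((candidates.filter (pvOvB s e)).map (fun q => (pvDist s e q, -(pvOv s e q), q))) []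
        rw [← pv_sorted2_eq_foldl] at this
        rw [hsort] at this
        simpa using this.symm
      rw [show (none : Option (Int × Int × List (String × Int)))
            = Option.map (fun q => (pvDist s e q, -(pvOv s e q), q)) none from rfl,
        pv_foldB_map] at hmin
      obtain ⟨p1, hp1min, hp1it⟩ := Option.map_eq_some_iff.mp hmin
      obtain ⟨preF, sufF, hfeq, hpreF, hsufF⟩ :=
        pv_minB_decomp (fun x y => pvLt2 (pvDist s e x, -(pvOv s e x), x) (pvDist s e y, -(pvOv s e y), y)) (fun _ _ _ h1 h2 => pv_lt2_P1 _ _ _ h1 h2) (fun _ _ _ h1 h2 => pv_lt2_P2 _ _ _ h1 h2) _ p1 hp1min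
      obtain ⟨l1, l2, hc12, hfl1, hfl2⟩ := List.filter_eq_append_iff.mp hfeq
      obtain ⟨l3, l4, hl2eq, hl3, hp1ov, hfl4⟩ := List.filter_eq_cons_iff.mp hfl2
      have hcand : candidates = (l1 ++ l3) ++ p1 :: l4 := by
        rw [hc12, hl2eq]; simp
      have hmem : ∀ y, y ∈ (l1 ++ l3) ∨ y = p1 ∨ y ∈ l4 → y ∈ candidates := by
        intro y hy
        rw [hcand]
        rcases hy with hy | hy | hy
        · exact List.mem_append_left _ hy
        · exact List.mem_append_right _ (by rw [hy]; simp)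
        · exact List.mem_append_right _ (by simp [hy])
      have hp1mem : p1 ∈ candidates := hmem p1 (Or.inr (Or.inl rfl))
      have hp1ex : pvExact s e p1 = false := hnoex p1 hp1mem
      have hne : candidates ≠ [] := by rw [hcand]; simp
      rw [pv_B_ne candidates s e hne, hcand, pv_B_foldB]
      rw [pv_minB_of_decomp _ (l1 ++ l3) l4 p1 ?hpre ?hsuf]
      case hpre =>
        intro y hy
        have hymem : y ∈ candidates := hmem y (Or.inl hy)
        have hyex : pvExact s e y = false := hnoex y hymem
        cases hyov : pvOvB s e y with
        | false => exact pv_ov_lt_far s e p1 y hp1ex hp1ov hyex hyov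
        | true =>
          have hyl1 : y ∈ l1 := by
            rcases List.mem_append.mp hy with h | h
            · exact h
            · exact absurd hyov (hl3 y h)
          have hyF : y ∈ preF := by
            rw [← hfl1]; exact List.mem_filter.mpr ⟨hyl1, hyov⟩
          rw [pv_ov_lt_transfer s e p1 y hp1ex hp1ov hyex hyov]
          exact hpreF y hyF
      case hsuf =>
        intro y hy
        have hymem : y ∈ candidates := hmem y (Or.inr (Or.inr hy))
        have hyex : pvExact s e y = false := hnoex y hymem
        cases hyov : pvOvB s e y with
        | false =>
          rw [Bool.eq_false_iff]
          intro hcon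
          have h1 := pv_ov_lt_far s e p1 y hp1ex hp1ov hyex hyov
          -- y's tier-2 priority cannot be before p1's tier-1 priority
          rw [pv_pr_ov s e p1 hp1ex hp1ov, pv_pr_far s e y hyex hyov] at hcon
          simp [pvTupleLt] at hcon
        | true =>
          have hyF : y ∈ sufF := by
            rw [← hfl4]; exact List.mem_filter.mpr ⟨hy, hyov⟩
          rw [pv_ov_lt_transfer s e y p1 hyex hyov hp1ex hp1ov]
          exact hsufF y hyF
      show some it.2.2 = some p1
      rw [← hp1it]
    | nil =>
      -- no overlapping player: A falls through to the nearest phase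
      have hof : candidates.filter (pvOvB s e) = [] := by
        by_contra hcon
        cases hcase : (candidates.filter (pvOvB s e)).map (fun q => (pvDist s e q, -(pvOv s e q), q)) with
        | nil => exact hcon (List.map_eq_nil_iff.mp hcase)
        | cons a t =>
          have hhd := pv_sortFold_head? pvLt2 ((candidates.filter (pvOvB s e)).map (fun q => (pvDist s e q, -(pvOv s e q), q))) []
          rw [← pv_sorted2_eq_foldl, hsort, hcase] at hhd
          simp only [List.head?_nil, List.foldl_cons, pvStepB] at hhd
          obtain ⟨m, hm⟩ := pv_foldB_isSome pvLt2 t a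
          rw [hm] at hhd
          exact absurd hhd.symm (by simp)
      have hnoov : ∀ y ∈ candidates, pvOvB s e y = false := by
        intro y hy
        exact Bool.eq_false_iff.mpr (List.filter_eq_nil_iff.mp hof y hy)
      have hnear := pv_foldl_map (fun q => (pvDist s e q, q)) candidates []
      simp only [List.nil_append] at hnear
      rw [hnear]
      cases hsortN : PySem.List.sorted (candidates.map (fun q => (pvDist s e q, q))) (fun item => item.1) false with
      | nil =>
        have : candidates = [] :=
          List.map_eq_nil_iff.mp ((PySem.List.sorted_eq_nil_iff _ _ _).mp hsortN)
        rw [this]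
        rfl
      | cons it irest =>
        have hmin : (candidates.map (fun q => (pvDist s e q, q))).foldl (pvStepB pvLtN) none = some it := by
          have := pv_sortFold_head? pvLtN (candidates.map (fun q => (pvDist s e q, q))) []
          rw [← pv_sortedN_eq_foldl, hsortN] at this
          simpa using this.symm
        rw [show (none : Option (Int × List (String × Int)))
              = Option.map (fun q => (pvDist s e q, q)) none from rfl, pv_foldB_map] at hmin
        obtain ⟨p2, hp2min, hp2it⟩ := Option.map_eq_some_iff.mp hmin
        obtain ⟨preN, sufN, hceq, hpreN, hsufN⟩ :=
          pv_minB_decomp (fun x y => pvLtN (pvDist s e x, x) (pvDist s e y, y)) (fun _ _ _ h1 h2 => pv_ltN_P1 _ _ _ h1 h2) (fun _ _ _ h1 h2 => pv_ltN_P2 _ _ _ h1 h2) _ p2 hp2min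
        have hmem : ∀ y, y ∈ preN ∨ y = p2 ∨ y ∈ sufN → y ∈ candidates := by
          intro y hy
          rw [hceq]
          rcases hy with hy | hy | hy
          · exact List.mem_append_left _ hy
          · exact List.mem_append_right _ (by rw [hy]; simp)
          · exact List.mem_append_right _ (by simp [hy])
        have hp2mem : p2 ∈ candidates := hmem p2 (Or.inr (Or.inl rfl))
        have hne : candidates ≠ [] := by rw [hceq]; simp
        rw [pv_B_ne candidates s e hne, hceq, pv_B_foldB]
        rw [pv_minB_of_decomp _ preN sufN p2 ?hpre ?hsuf]
        case hpre =>
          intro y hy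
          have hymem : y ∈ candidates := hmem y (Or.inl hy)
          rw [pv_far_lt_transfer s e p2 y (hnoex p2 hp2mem) (hnoov p2 hp2mem)
            (hnoex y hymem) (hnoov y hymem)]
          exact hpreN y hy
        case hsuf =>
          intro y hy
          have hymem : y ∈ candidates := hmem y (Or.inr (Or.inr hy))
          rw [pv_far_lt_transfer s e y p2 (hnoex y hymem) (hnoov y hymem)
            (hnoex p2 hp2mem) (hnoov p2 hp2mem)]
          exact hsufN y hy
        show some it.2 = some p2
        rw [← hp2it]

-- ===== VERDICT (by name: the statement is the Claim_ definition above) =====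
theorem choose_player_spec : Claim_equal_choose_player := by
  intro candidates s e _
  unfold Spec_choose_player
  exact pv_main candidates s e
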